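-- pv_equiv track=rewrite | github.com/ibnu-asma/A2SV-competitive_programming | A2SV Remote Contest #4 24-Feb-2025/E - Looking for 1543 281496.py | count_1543
-- ===== SOURCE A (Python) =====
-- def count_1543(s):
--     if len(s) < 4:
--         return 0
--     s_extended = s + s[:3]
--     count = 0
--     target = "1543"
--     for i in range(len(s)):
--         if s_extended[i:i+4] == target:
--             count += 1
--     return count
-- ===== SOURCE B (Python) =====
-- def count_1543(s):
--     n = len(s)
--     if n < 4:
--         return 0
--     target = "1543"
--     state = 0
--     count = 0
--     for c in s + s[:3]:
--         if c == target[state]: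
--             state += 1
--             if state == 4:
--                 count += 1
--                 state = 0
--         elif c == '1':
--             state = 1
--         else:
--             state = 0
--     return count
-- ===== Notes on version B (the rewrite author's own statement) =====
-- stated objective: faster
-- what changed: B replaces A's per-position 4-character slice comparisons with a single streaming KMP-style state machine (match-progress automaton for the pattern '1543') that counts accepting transitions in one pass over the circularly extended string.
import Mathlib
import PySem

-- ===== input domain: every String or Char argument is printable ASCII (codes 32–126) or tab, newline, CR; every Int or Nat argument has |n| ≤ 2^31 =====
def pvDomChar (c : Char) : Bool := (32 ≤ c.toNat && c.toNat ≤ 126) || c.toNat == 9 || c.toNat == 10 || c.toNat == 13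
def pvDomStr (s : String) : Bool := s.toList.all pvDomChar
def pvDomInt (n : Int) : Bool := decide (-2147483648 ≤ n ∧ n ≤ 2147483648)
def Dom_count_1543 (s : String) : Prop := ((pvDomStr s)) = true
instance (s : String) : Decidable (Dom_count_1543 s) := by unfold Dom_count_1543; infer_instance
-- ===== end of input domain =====

-- B replaces A's per-position 4-character slice comparisons with a single
-- streaming KMP-style state machine for the pattern "1543", avoiding the per-index
-- slice allocations (objective: faster by a constant factor, measured by the check).

-- ===== PORT A =====
def count_1543 (s : String) : Int :=
  let l := s.toList
  if l.length < 4 then 0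
  else
    let ext := l ++ PySem.List.slice l none (some 3)
    let target := "1543".toList
    (PySem.List.pyRange 0 (l.length : Int) 1).foldl
      (fun count i =>
        if PySem.List.slice ext (some i) (some (i + 4)) = target then count + 1 else count) 0

-- ===== PORT B =====
-- the loop body of Source B: one automaton step on (state, count)
def pvStep (sc : Int × Int) (c : Char) : Int × Int :=
  let state := sc.1
  let count := sc.2
  if c = PySem.List.pyGetD "1543".toList state ' ' then
    let state := state + 1
    if state = 4 then (0, count + 1) else (state, count)
  else if c = '1' then (1, count)
  else (0, count)

def count_1543_alt (s : String) : Int :=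
  let l := s.toList
  let n := l.length
  if n < 4 then 0
  else ((l ++ PySem.List.slice l none (some 3)).foldl pvStep (0, 0)).2

-- ===== PRECONDITION & SPEC =====
def Spec_count_1543 (s : String) (out : Int) : Prop := out = count_1543_alt s
instance (s : String) (out : Int) : Decidable (Spec_count_1543 s out) := by unfold Spec_count_1543; infer_instance

-- ===== CLAIM (what is proved, stated in full; the proofs are below) =====
def Claim_equal_count_1543 : Prop := ∀ (s : String), Dom_count_1543 s → Spec_count_1543 s (count_1543 s)

-- ===== LEMMAS AND PROOFS =====

-- number of occurrences of "1543" among the 4-windows of a list, head recursion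
def occN : List Char → Nat
  | [] => 0
  | c :: rest => (if (c :: rest).take 4 = ['1','5','4','3'] then 1 else 0) + occN rest

-- the automaton state determined by the last ≤ 3 characters
def stateOf (L : List Char) : Int :=
  if L.drop (L.length - 3) = ['1','5','4'] then 3
  else if L.drop (L.length - 2) = ['1','5'] then 2
  else if L.drop (L.length - 1) = ['1'] then 1
  else 0

lemma ne_pat_of_len {x : List Char} (h : x.length ≠ 4) : x ≠ ['1','5','4','3'] :=
  fun he => h (by rw [he]; rfl)

lemma app_single {x y : List Char} {a b : Char} : x ++ [a] = y ++ [b] ↔ x = y ∧ a = b := by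
  constructor
  · intro h
    have h2 := List.append_inj' h rfl
    exact ⟨h2.1, by injection h2.2⟩
  · rintro ⟨rfl, rfl⟩; rfl

lemma app1 {x : List Char} {c : Char} : x ++ [c] = ['1'] ↔ x = [] ∧ c = '1' := by
  rw [show (['1'] : List Char) = [] ++ ['1'] from rfl]; exact app_single

lemma app2 {x : List Char} {c : Char} : x ++ [c] = ['1','5'] ↔ x = ['1'] ∧ c = '5' := by
  rw [show (['1','5'] : List Char) = ['1'] ++ ['5'] from rfl]; exact app_single

lemma app3 {x : List Char} {c : Char} : x ++ [c] = ['1','5','4'] ↔ x = ['1','5'] ∧ c = '4' := by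
  rw [show (['1','5','4'] : List Char) = ['1','5'] ++ ['4'] from rfl]; exact app_single

lemma app4 {x : List Char} {c : Char} :
    x ++ [c] = ['1','5','4','3'] ↔ x = ['1','5','4'] ∧ c = '3' := by
  rw [show (['1','5','4','3'] : List Char) = ['1','5','4'] ++ ['3'] from rfl]; exact app_single

lemma occ_append (L : List Char) (c : Char) :
    occN (L ++ [c]) = occN L +
      (if L.drop (L.length - 3) ++ [c] = ['1','5','4','3'] then 1 else 0) := by
  induction L with
  | nil =>
    simp only [List.nil_append, occN, List.drop_nil]
    rw [if_neg (ne_pat_of_len (by simp)), if_neg (ne_pat_of_len (by simp))]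
  | cons a L ih =>
    show occN (a :: (L ++ [c])) = _
    rw [occN, ih]
    by_cases h3 : 3 ≤ L.length
    · have htake : (a :: (L ++ [c])).take 4 = (a :: L).take 4 := by
        rw [show a :: (L ++ [c]) = (a :: L) ++ [c] from rfl,
            List.take_append_of_le_length (by simp; omega)]
      have hdrop : (a :: L).drop ((a :: L).length - 3) = L.drop (L.length - 3) := by
        simp only [List.length_cons]
        rw [show L.length + 1 - 3 = (L.length - 3) + 1 from by omega, List.drop_succ_cons]
      rw [htake, hdrop, occN]
      ring
    · push_neg at h3
      have hL : ¬ L.drop (L.length - 3) ++ [c] = ['1','5','4','3'] := by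
        rw [show L.length - 3 = 0 from by omega, List.drop_zero]
        exact ne_pat_of_len (by simp; omega)
      have hA : ¬ (a :: L).take 4 = ['1','5','4','3'] :=
        ne_pat_of_len (by simp; omega)
      rw [if_neg hL, occN, if_neg hA]
      by_cases h2 : L.length = 2
      · have hz : (a :: L).length - 3 = 0 := by simp; omega
        rw [hz, List.drop_zero]
        have ht : (a :: (L ++ [c])).take 4 = a :: L ++ [c] := by
          rw [List.take_of_length_le (by simp; omega)]
          rfl
        rw [ht]
        simp only [List.cons_append]
        ring
      · have hA' : ¬ (a :: (L ++ [c])).take 4 = ['1','5','4','3'] := by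
          rw [List.take_of_length_le (by simp; omega)]
          exact ne_pat_of_len (by simp; omega)
        have hR : ¬ (a :: L).drop ((a :: L).length - 3) ++ [c] = ['1','5','4','3'] := by
          rw [show (a :: L).length - 3 = 0 from by simp; omega, List.drop_zero]
          exact ne_pat_of_len (by simp; omega)
        rw [if_neg hA', if_neg hR]
        ring

-- appending one char shifts the "last k chars" window
lemma drop_app (L : List Char) (c : Char) (k : Nat) (hk : 1 ≤ k) :
    (L ++ [c]).drop ((L ++ [c]).length - k) = L.drop (L.length - (k - 1)) ++ [c] := by
  rw [List.drop_append_of_le_length (by simp; omega)]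
  congr 2
  simp
  omega

lemma stateOf_app (L : List Char) (c : Char) :
    stateOf (L ++ [c]) =
      if L.drop (L.length - 2) = ['1','5'] ∧ c = '4' then 3
      else if L.drop (L.length - 1) = ['1'] ∧ c = '5' then 2
      else if c = '1' then 1 else 0 := by
  rw [stateOf, drop_app L c 3 (by omega), drop_app L c 2 (by omega), drop_app L c 1 (by omega)]
  norm_num [List.drop_length, app3, app2, app1]

-- from the 3-suffix, the shorter suffixes
lemma e3_suffixes (L : List Char) (h : L.drop (L.length - 3) = ['1','5','4']) :
    L.drop (L.length - 2) = ['5','4'] ∧ L.drop (L.length - 1) = ['4'] := by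
  have hlen : 3 ≤ L.length := by
    have hl := congrArg List.length h
    simp at hl; omega
  constructor
  · have hd : L.drop (L.length - 2) = (L.drop (L.length - 3)).drop 1 := by
      rw [List.drop_drop]; congr 1; omega
    rw [hd, h]
    rfl
  · have hd : L.drop (L.length - 1) = (L.drop (L.length - 3)).drop 2 := by
      rw [List.drop_drop]; congr 1; omega
    rw [hd, h]
    rfl

lemma e2_suffix (L : List Char) (h : L.drop (L.length - 2) = ['1','5']) :
    L.drop (L.length - 1) = ['5'] := by
  have hlen : 2 ≤ L.length := by
    have hl := congrArg List.length h
    simp at hl; omega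
  have hd : L.drop (L.length - 1) = (L.drop (L.length - 2)).drop 1 := by
    rw [List.drop_drop]; congr 1; omega
  rw [hd, h]
  rfl

-- one automaton step preserves the (state, count) characterisation
lemma invariant (L : List Char) :
    L.foldl pvStep (0, 0) = (stateOf L, (occN L : Int)) := by
  induction L using List.reverseRecOn with
  | nil =>
    simp [stateOf, occN]
  | append_singleton L c ih =>
    rw [List.foldl_append, ih, List.foldl_cons, List.foldl_nil, occ_append, stateOf_app]
    simp only [app4]
    have hg0 : PySem.List.pyGetD ['1','5','4','3'] (0 : Int) ' ' = '1' := by decide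
    have hg1 : PySem.List.pyGetD ['1','5','4','3'] (1 : Int) ' ' = '5' := by decide
    have hg2 : PySem.List.pyGetD ['1','5','4','3'] (2 : Int) ' ' = '4' := by decide
    have hg3 : PySem.List.pyGetD ['1','5','4','3'] (3 : Int) ' ' = '3' := by decide
    by_cases h3 : L.drop (L.length - 3) = ['1','5','4']
    · obtain ⟨h2', h1'⟩ := e3_suffixes L h3
      rw [show stateOf L = 3 from by rw [stateOf, if_pos h3], h3, h2', h1']
      by_cases hc3 : c = '3'
      · subst hc3; simp [pvStep, hg3]
      · by_cases hc1 : c = '1'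
        · subst hc1; simp [pvStep, hg3]
        · simp [pvStep, hg3, hc3, hc1]
    · by_cases h2 : L.drop (L.length - 2) = ['1','5']
      · have h1' := e2_suffix L h2
        rw [show stateOf L = 2 from by rw [stateOf, if_neg h3, if_pos h2], h2, h1']
        simp only [h3]
        by_cases hc4 : c = '4'
        · subst hc4; simp [pvStep, hg2]
        · by_cases hc1 : c = '1'
          · subst hc1; simp [pvStep, hg2]
          · simp [pvStep, hg2, hc4, hc1]
      · by_cases h1 : L.drop (L.length - 1) = ['1']
        · rw [show stateOf L = 1 from by rw [stateOf, if_neg h3, if_neg h2, if_pos h1], h1]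
          simp only [h3, h2]
          by_cases hc5 : c = '5'
          · subst hc5; simp [pvStep, hg1]
          · by_cases hc1 : c = '1'
            · subst hc1; simp [pvStep, hg1]
            · simp [pvStep, hg1, hc5, hc1]
        · rw [show stateOf L = 0 from by rw [stateOf, if_neg h3, if_neg h2, if_neg h1]]
          simp only [h3, h2, h1]
          by_cases hc1 : c = '1'
          · subst hc1; simp [pvStep, hg0]
          · simp [pvStep, hg0, hc1]

-- occN counts exactly the window positions of the range
lemma occ_eq_countP (L : List Char) :
    occN L = (List.range L.length).countP
      (fun i => decide ((L.drop i).take 4 = ['1','5','4','3'])) := by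
  induction L with
  | nil => simp [occN]
  | cons a L ih =>
    rw [occN, ih]
    rw [List.length_cons, List.range_succ_eq_map, List.countP_cons, List.countP_map]
    have hcp : List.countP
        ((fun i => decide (((a :: L).drop i).take 4 = ['1','5','4','3'])) ∘ Nat.succ)
        (List.range L.length) =
        List.countP (fun i => decide ((L.drop i).take 4 = ['1','5','4','3']))
          (List.range L.length) := by
      apply List.countP_congr
      intro i _
      simp [List.drop_succ_cons]
    rw [hcp]
    simp only [List.drop_zero, decide_eq_true_eq]
    exact Nat.add_comm _ _

-- the three too-short windows at the end of the extended string never match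
lemma countP_trim (L : List Char) (n : Nat) (h : L.length = n + 3) :
    (List.range L.length).countP
        (fun i => decide ((L.drop i).take 4 = ['1','5','4','3'])) =
    (List.range n).countP
        (fun i => decide ((L.drop i).take 4 = ['1','5','4','3'])) := by
  have hfalse : ∀ k, n ≤ k → k < L.length →
      decide ((L.drop k).take 4 = ['1','5','4','3']) = false := by
    intro k hk hk2
    simp only [decide_eq_false_iff_not]
    exact ne_pat_of_len (by simp [List.length_take, List.length_drop]; omega)
  rw [h, List.range_succ, List.range_succ, List.range_succ,
      List.countP_append, List.countP_append, List.countP_append]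
  simp only [List.countP_cons, List.countP_nil]
  rw [hfalse n (by omega) (by omega), hfalse (n+1) (by omega) (by omega),
      hfalse (n+2) (by omega) (by omega)]
  simp

-- ===== VERDICT (by name: the statement is the Claim_ definition above) =====
theorem count_1543_spec : Claim_equal_count_1543 := by
  intro s _
  unfold Spec_count_1543 count_1543 count_1543_alt
  set l := s.toList with hl
  by_cases hlen : l.length < 4
  · simp [hlen]
  · push_neg at hlen
    simp only [if_neg (by omega : ¬ l.length < 4)]
    rw [invariant]
    have hsl : PySem.List.slice l none (some 3) = l.take 3 := by
      rw [PySem.List.slice_to _ (by omega : (0:Int) ≤ 3)]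
      rfl
    rw [hsl]
    set ext := l ++ l.take 3 with hext
    have hextlen : ext.length = l.length + 3 := by
      simp [hext, List.length_take]
      omega
    -- A's counting fold is a countP over the window positions
    rw [PySem.List.foldl_ite_add_one]
    rw [PySem.List.pyRange_one]
    rw [List.countP_map]
    have hc : (List.range ((l.length : Int) - 0).toNat).countP
        ((fun i => decide (PySem.List.slice ext (some i) (some (i + 4)) = "1543".toList)) ∘
          (fun k : Nat => (0 : Int) + k)) =
        (List.range l.length).countP
          (fun i => decide ((ext.drop i).take 4 = ['1','5','4','3'])) := by
      have hr : ((l.length : Int) - 0).toNat = l.length := by omega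
      rw [hr]
      apply List.countP_congr
      intro i _
      simp only [Function.comp_apply, decide_eq_true_eq]
      have he : PySem.List.slice ext (some ((0 : Int) + i)) (some ((0 : Int) + i + 4)) =
          (ext.drop i).take 4 := by
        rw [show (0 : Int) + (i : Int) = (i : Int) from by ring]
        rw [PySem.List.slice_toNat _ (by positivity) (by positivity)]
        rw [show ((i : Int) + 4).toNat - ((i : Int)).toNat = 4 from by omega,
            show ((i : Int)).toNat = i from by omega]
      rw [he, show "1543".toList = ['1','5','4','3'] from rfl]
    rw [hc, ← countP_trim ext l.length hextlen, ← occ_eq_countP]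
    simp
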